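-- pv_equiv track=rewrite | github.com/CAgAG/Arithmetic_PY | 字符串/求相对路径.py | GetRelativePath
-- ===== SOURCE A (Python) =====
-- def GetRelativePath(path1: str, path2: str):
--     if (path1 or path2) is None:
--         return
--
--     relativePath = ''
--
--     # 不同路径起始长度
--     diff1 = diff2 = 0
--
--     i = 0
--     j = 0
--     len1 = len(path1)
--     len2 = len(path2)
--
--     while i < len1 and j < len2:
--         # 目录相同, 继续遍历
--         if path1[i] == path2[j]:
--             if path1[i] == '/':
--                 diff1 = i
--                 diff2 = j
--             i += 1
--             j += 1
--         else:
--             # 不同目录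
--             # path1 非公共部分转为 '../'
--             diff1 += 1
--             while diff1 < len1:
--                 if path1[diff1] == '/':
--                     relativePath += '../'
--                 diff1 += 1
--
--             diff2 += 1
--             relativePath += path2[diff2:]
--             return relativePath
-- ===== SOURCE B (Python) =====
-- def GetRelativePath(path1: str, path2: str):
--     if (path1 or path2) is None:
--         return
--
--     n = min(len(path1), len(path2))
--     # first index where the paths differ (n if one is a prefix of the other)
--     k = next((i for i, (a, b) in enumerate(zip(path1, path2)) if a != b), n)
--     if k == n:
--         return None
--
--     # last '/' inside the common prefix, 0 if there is none
--     s = 0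
--     for i, ch in enumerate(path1[:k]):
--         if ch == '/':
--             s = i
--
--     return '../' * path1[s + 1:].count('/') + path2[s + 1:]
-- ===== Notes on version B (the rewrite author's own statement) =====
-- stated objective: alternative
-- what changed: A tracks the last common '/' and builds the '../' string inside one interleaved character-compare loop; B first finds the first mismatch index, then locates the last '/' of the common prefix, and produces the result by count-and-repeat plus a slice.
import Mathlib
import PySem

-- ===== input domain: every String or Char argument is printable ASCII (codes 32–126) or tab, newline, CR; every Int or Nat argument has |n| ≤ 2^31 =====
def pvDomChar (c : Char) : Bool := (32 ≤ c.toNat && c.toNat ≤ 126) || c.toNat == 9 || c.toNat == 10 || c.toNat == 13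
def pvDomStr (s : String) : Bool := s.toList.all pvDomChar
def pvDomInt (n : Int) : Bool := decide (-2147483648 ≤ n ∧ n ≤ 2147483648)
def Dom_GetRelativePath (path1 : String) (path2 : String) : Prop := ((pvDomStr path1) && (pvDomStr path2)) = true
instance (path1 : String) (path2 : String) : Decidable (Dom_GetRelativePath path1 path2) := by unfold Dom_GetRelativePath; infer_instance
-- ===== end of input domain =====

-- B replaces A's interleaved slash-tracking scan by a find-first-mismatch /
-- last-slash-in-prefix / count-and-slice decomposition (objective: alternative; the timing
-- run measured B faster by a constant factor).

-- ===== PORT A =====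
-- inner 'while diff1 < len1' loop: appends '../' for every '/' at positions diff1..len1-1
def innerA (p1 : List Char) (len1 : Nat) (diff1 : Nat) (rel : List Char) : List Char :=
  if _h : diff1 < len1 then
    innerA p1 len1 (diff1 + 1) (if p1.getD diff1 ' ' == '/' then rel ++ ['.', '.', '/'] else rel)
  else rel
termination_by len1 - diff1

-- main 'while i < len1 and j < len2' loop of A
def loopA (p1 p2 : List Char) (len1 len2 : Nat) (i j diff1 diff2 : Nat) (rel : List Char) :
    Option (List Char) :=
  if _h : i < len1 ∧ j < len2 then
    if p1.getD i ' ' == p2.getD j ' ' then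
      if p1.getD i ' ' == '/' then
        loopA p1 p2 len1 len2 (i + 1) (j + 1) i j rel
      else
        loopA p1 p2 len1 len2 (i + 1) (j + 1) diff1 diff2 rel
    else
      some (innerA p1 len1 (diff1 + 1) rel ++ p2.drop (diff2 + 1))
  else none
termination_by len1 - i

def GetRelativePath (path1 : String) (path2 : String) : Option String :=
  -- '(path1 or path2) is None' is always False for str arguments, so no early return
  let p1 := path1.toList
  let p2 := path2.toList
  (loopA p1 p2 p1.length p2.length 0 0 0 0 []).map String.mk

-- ===== PORT B =====
def GetRelativePath_alt (path1 : String) (path2 : String) : Option String :=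
  -- '(path1 or path2) is None' is always False for str arguments, so no early return
  let p1 := path1.toList
  let p2 := path2.toList
  let n := min p1.length p2.length
  -- next((i for i, (a, b) in enumerate(zip(path1, path2)) if a != b), n)
  let k := ((p1.zip p2).findIdx? (fun ab => ab.1 != ab.2)).getD n
  if k = n then none
  else
    -- for i, ch in enumerate(path1[:k]): if ch == '/': s = i
    let s := (p1.take k).zipIdx.foldl (fun s ci => if ci.1 == '/' then ci.2 else s) 0
    -- '../' * path1[s+1:].count('/') + path2[s+1:]
    -- ('/' is a single character, so str.count on the slice = element count; exact)
    some (String.mk ((List.replicate ((p1.drop (s + 1)).count '/') ['.', '.', '/']).flatten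
      ++ p2.drop (s + 1)))

-- ===== PRECONDITION & SPEC =====
def Spec_GetRelativePath (path1 : String) (path2 : String) (out : Option String) : Prop := out = GetRelativePath_alt path1 path2
instance (path1 : String) (path2 : String) (out : Option String) : Decidable (Spec_GetRelativePath path1 path2 out) := by unfold Spec_GetRelativePath; infer_instance

-- ===== CLAIM (what is proved, stated in full; the proofs are below) =====
def Claim_equal_GetRelativePath : Prop := ∀ (path1 : String) (path2 : String), Dom_GetRelativePath path1 path2 → Spec_GetRelativePath path1 path2 (GetRelativePath path1 path2)

-- ===== LEMMAS AND PROOFS =====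

lemma innerA_eq (p1 : List Char) :
    ∀ fuel t rel, p1.length - t ≤ fuel → innerA p1 p1.length t rel =
      rel ++ (List.replicate ((p1.drop t).count '/') ['.', '.', '/']).flatten := by
  intro fuel
  induction fuel with
  | zero =>
    intro t rel h
    have ht : ¬ t < p1.length := by omega
    rw [innerA]
    simp [ht, List.drop_eq_nil_of_le (by omega : p1.length ≤ t)]
  | succ f ih =>
    intro t rel h
    rw [innerA]
    by_cases ht : t < p1.length
    · simp only [ht, dite_true]
      rw [ih (t + 1) _ (by omega)]
      have hc' : (p1.drop t).count '/' =
          (p1.drop (t + 1)).count '/' + (if p1.getD t ' ' == '/' then 1 else 0) := by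
        rw [List.drop_eq_getElem_cons ht, List.count_cons, List.getD_eq_getElem p1 ' ' ht]
      rw [hc']
      by_cases hc : (p1.getD t ' ' == '/') = true
      · rw [if_pos hc, if_pos hc]
        simp [List.replicate_succ]
      · rw [if_neg hc, if_neg hc]
        simp
    · simp [ht, List.drop_eq_nil_of_le (by omega : p1.length ≤ t)]

lemma findIdx_zip_self (t : List Char) :
    (t.zip t).findIdx? (fun ab => ab.1 != ab.2) = none := by
  induction t with
  | nil => simp
  | cons a t ih => simp [List.findIdx?_cons, ih]

lemma zip_eq_zip_take : ∀ (p1 p2 : List Char),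
    p1.zip p2 = (p1.take (min p1.length p2.length)).zip (p2.take (min p1.length p2.length))
  | [], _ => by simp
  | _ :: _, [] => by simp
  | a :: p, b :: q => by
    simp only [List.length_cons, Nat.succ_min_succ, List.take_succ_cons, List.zip_cons_cons]
    rw [← zip_eq_zip_take p q]

lemma findIdx_zip_none (p1 p2 : List Char)
    (h : p1.take (min p1.length p2.length) = p2.take (min p1.length p2.length)) :
    (p1.zip p2).findIdx? (fun ab => ab.1 != ab.2) = none := by
  rw [zip_eq_zip_take, h]
  exact findIdx_zip_self _

lemma findIdx_zip_some (p1 p2 : List Char) (i : Nat)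
    (hi : i < min p1.length p2.length) (hpre : p1.take i = p2.take i)
    (hne : p1.getD i ' ' ≠ p2.getD i ' ') :
    (p1.zip p2).findIdx? (fun ab => ab.1 != ab.2) = some i := by
  have h1 : i < p1.length := by omega
  have h2 : i < p2.length := by omega
  have hne' : (p1[i] != p2[i]) = true := by
    rw [List.getD_eq_getElem p1 ' ' h1, List.getD_eq_getElem p2 ' ' h2] at hne
    simpa using hne
  have e1 : p1 = p1.take i ++ p1.drop i := (List.take_append_drop i p1).symm
  have e2 : p2 = p2.take i ++ p2.drop i := (List.take_append_drop i p2).symm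
  have hlen : (p1.take i).length = (p2.take i).length := by
    simp [Nat.min_eq_left (le_of_lt h1), Nat.min_eq_left (le_of_lt h2)]
  conv_lhs => rw [e1, e2]
  rw [List.zip_append hlen, List.findIdx?_append, hpre, findIdx_zip_self,
    List.drop_eq_getElem_cons h1, List.drop_eq_getElem_cons h2,
    List.zip_cons_cons, List.findIdx?_cons]
  simp [hne', Nat.min_eq_left (le_of_lt h2)]

lemma lastSlash_snoc (l : List Char) (c : Char) :
    ((l ++ [c]).zipIdx.foldl (fun s ci => if ci.1 == '/' then ci.2 else s) 0) =
      if c == '/' then l.length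
      else (l.zipIdx.foldl (fun s ci => if ci.1 == '/' then ci.2 else s) 0) := by
  rw [List.zipIdx_append, List.foldl_append]
  by_cases hc : c = '/' <;> simp [hc]

lemma main_loop (p1 p2 : List Char) :
    ∀ (fuel i d : Nat), min p1.length p2.length - i ≤ fuel →
      i ≤ min p1.length p2.length →
      p1.take i = p2.take i →
      ((p1.take i).zipIdx.foldl (fun s ci => if ci.1 == '/' then ci.2 else s) 0) = d →
      loopA p1 p2 p1.length p2.length i i d d [] =
        (let n := min p1.length p2.length
         let k := ((p1.zip p2).findIdx? (fun ab => ab.1 != ab.2)).getD n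
         if k = n then none
         else
           let s := (p1.take k).zipIdx.foldl (fun s ci => if ci.1 == '/' then ci.2 else s) 0
           some ((List.replicate ((p1.drop (s + 1)).count '/') ['.', '.', '/']).flatten
             ++ p2.drop (s + 1))) := by
  intro fuel
  induction fuel with
  | zero =>
    intro i d hf hi hpre hd
    have hin : i = min p1.length p2.length := by omega
    rw [loopA]
    have hcond : ¬ (i < p1.length ∧ i < p2.length) := by omega
    rw [findIdx_zip_none p1 p2 (hin ▸ hpre)]
    simp [hcond]
  | succ f ih =>
    intro i d hf hi hpre hd
    by_cases hin : i = min p1.length p2.length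
    · rw [loopA]
      have hcond : ¬ (i < p1.length ∧ i < p2.length) := by omega
      rw [findIdx_zip_none p1 p2 (hin ▸ hpre)]
      simp [hcond]
    · have hilt : i < min p1.length p2.length := by omega
      have h1 : i < p1.length := by omega
      have h2 : i < p2.length := by omega
      rw [loopA]
      have hcond : i < p1.length ∧ i < p2.length := ⟨h1, h2⟩
      rw [dif_pos hcond]
      by_cases hc : p1.getD i ' ' = p2.getD i ' '
      · -- equal characters: one more step; both diff-update branches feed the IH
        have hbeq : (p1.getD i ' ' == p2.getD i ' ') = true := beq_iff_eq.mpr hc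
        rw [if_pos hbeq]
        have hgeq : p1[i] = p2[i] := by
          rwa [List.getD_eq_getElem p1 ' ' h1, List.getD_eq_getElem p2 ' ' h2] at hc
        have htake : p1.take (i + 1) = p2.take (i + 1) := by
          rw [List.take_succ, List.take_succ, hpre]
          simp [List.getElem?_eq_getElem h1, List.getElem?_eq_getElem h2, hgeq]
        have hsnoc : p1.take (i + 1) = p1.take i ++ [p1[i]] := by
          rw [List.take_succ]; simp [List.getElem?_eq_getElem h1]
        have hlen : (p1.take i).length = i := by simp [Nat.min_eq_left (le_of_lt h1)]
        by_cases hs : (p1.getD i ' ' == '/') = true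
        · have hgs : (p1[i] == '/') = true := by
            rwa [List.getD_eq_getElem p1 ' ' h1] at hs
          rw [if_pos hs]
          exact ih (i + 1) i (by omega) (by omega) htake
            (by rw [hsnoc, lastSlash_snoc, if_pos hgs, hlen])
        · have hgs : ¬ (p1[i] == '/') = true := by
            rwa [List.getD_eq_getElem p1 ' ' h1] at hs
          rw [if_neg hs]
          exact ih (i + 1) d (by omega) (by omega) htake
            (by rw [hsnoc, lastSlash_snoc, if_neg hgs, hd])
      · -- first mismatch at i: A emits its result; B finds k = i
        have hbne : ¬ (p1.getD i ' ' == p2.getD i ' ') = true := by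
          simpa using hc
        rw [if_neg hbne]
        rw [findIdx_zip_some p1 p2 i hilt hpre hc]
        simp only [Option.getD_some]
        rw [if_neg hin]
        rw [innerA_eq p1 (p1.length - (d + 1)) (d + 1) [] (by omega)]
        rw [hd]
        simp

-- ===== VERDICT (by name: the statement is the Claim_ definition above) =====
theorem GetRelativePath_spec : Claim_equal_GetRelativePath := by
  intro path1 path2 _
  unfold Spec_GetRelativePath GetRelativePath GetRelativePath_alt
  have h := main_loop path1.toList path2.toList (min path1.toList.length path2.toList.length)
    0 0 (by omega) (by omega) (by simp) (by simp)
  simp only [h]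
  split <;> simp
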